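-- pv_equiv track=rewrite | github.com/alainrollejr/mypygames | reinforcement_learning/jacks_car_rental_1.py | index_for_s
-- ===== SOURCE A (Python) =====
-- MAX_CARS_ON_LOCATION = 20
--
-- TERMINAL_STATE = [-1,-1]
--
-- def index_for_s(s):
--     ind = 0
--     for n1 in range(0,MAX_CARS_ON_LOCATION+1,1):
--         for n2 in range(0,MAX_CARS_ON_LOCATION+1,1):
--             if s == [n1,n2]:
--                 return ind
--             ind += 1
--     if s == TERMINAL_STATE:
--         return ind
--     return -1
-- ===== SOURCE B (Python) =====
-- MAX_CARS_ON_LOCATION = 20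
--
-- TERMINAL_STATE = [-1,-1]
--
-- def index_for_s(s):
--     if s == TERMINAL_STATE:
--         return (MAX_CARS_ON_LOCATION + 1) ** 2
--     if len(s) == 2:
--         n1, n2 = s
--         if 0 <= n1 <= MAX_CARS_ON_LOCATION and 0 <= n2 <= MAX_CARS_ON_LOCATION:
--             return n1 * (MAX_CARS_ON_LOCATION + 1) + n2
--     return -1
-- ===== Notes on version B (the rewrite author's own statement) =====
-- stated objective: simpler
-- what changed: Replaced the nested 21x21 linear search over all states by the direct closed-form index n1*21+n2 with bounds and terminal-state checks.
import Mathlib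
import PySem

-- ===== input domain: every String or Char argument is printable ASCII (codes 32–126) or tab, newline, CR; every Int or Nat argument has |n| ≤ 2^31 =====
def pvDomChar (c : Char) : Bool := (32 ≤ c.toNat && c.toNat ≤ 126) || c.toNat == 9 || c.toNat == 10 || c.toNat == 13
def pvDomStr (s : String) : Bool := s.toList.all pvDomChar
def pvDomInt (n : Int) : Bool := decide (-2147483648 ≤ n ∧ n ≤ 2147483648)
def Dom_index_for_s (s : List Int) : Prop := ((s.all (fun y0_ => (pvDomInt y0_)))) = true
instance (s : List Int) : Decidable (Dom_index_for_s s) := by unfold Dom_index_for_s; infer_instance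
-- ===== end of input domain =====

-- B replaces A's nested 21x21 linear search by the closed-form index n1*21+n2 with bounds/terminal checks (simpler).

-- ===== PORT A =====
-- inner 'for n2' loop: returns (some ind) on the early return, else (none, updated ind)
def pvInnerA (s : List Int) (n1 : Int) : List Int → Int → Option Int × Int
  | [], ind => (none, ind)
  | n2 :: rest, ind =>
    if s = [n1, n2] then (some ind, ind) else pvInnerA s n1 rest (ind + 1)

-- outer 'for n1' loop
def pvOuterA (s : List Int) : List Int → Int → Option Int × Int
  | [], ind => (none, ind)
  | n1 :: rest, ind =>
    match pvInnerA s n1 (PySem.List.pyRange 0 21 1) ind with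
    | (some r, i) => (some r, i)
    | (none, ind') => pvOuterA s rest ind'

def index_for_s (s : List Int) : Int :=
  match pvOuterA s (PySem.List.pyRange 0 21 1) 0 with
  | (some r, _) => r
  | (none, ind) => if s = [-1, -1] then ind else -1

-- ===== PORT B =====
def index_for_s_alt (s : List Int) : Int :=
  if s = [-1, -1] then 21 ^ 2
  else
    match s with
    | [n1, n2] =>
      if 0 ≤ n1 ∧ n1 ≤ 20 ∧ 0 ≤ n2 ∧ n2 ≤ 20 then n1 * 21 + n2 else -1
    | _ => -1

-- ===== PRECONDITION & SPEC =====
def Spec_index_for_s (s : List Int) (out : Int) : Prop := out = index_for_s_alt s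
instance (s : List Int) (out : Int) : Decidable (Spec_index_for_s s out) := by unfold Spec_index_for_s; infer_instance

-- ===== CLAIM (what is proved, stated in full; the proofs are below) =====
def Claim_equal_index_for_s : Prop := ∀ (s : List Int), Dom_index_for_s s → Spec_index_for_s s (index_for_s s)

-- ===== LEMMAS AND PROOFS =====

-- inner loop finds nothing: final ind advances by the full range length
theorem pvInnerA_none (s : List Int) (n1 : Int) :
    ∀ (ns : List Int) (ind : Int), (∀ n2 ∈ ns, s ≠ [n1, n2]) →
      pvInnerA s n1 ns ind = (none, ind + ns.length) := by
  intro ns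
  induction ns with
  | nil => intro ind _; simp [pvInnerA]
  | cons n2 rest ih =>
      intro ind h
      have h1 : s ≠ [n1, n2] := h n2 (by simp)
      simp only [pvInnerA, if_neg h1]
      rw [ih (ind + 1) (fun m hm => h m (by simp [hm]))]
      simp; ring

-- outer loop on a state that never matches anywhere
theorem pvOuterA_none (s : List Int) :
    ∀ (L : List Int) (ind : Int),
      (∀ n1 ∈ L, ∀ n2 ∈ PySem.List.pyRange 0 21 1, s ≠ [n1, n2]) →
      pvOuterA s L ind = (none, ind + 21 * L.length) := by
  intro L
  induction L with
  | nil => intro ind _; simp [pvOuterA]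
  | cons n1 rest ih =>
      intro ind h
      have hin : pvInnerA s n1 (PySem.List.pyRange 0 21 1) ind
          = (none, ind + 21) := by
        rw [pvInnerA_none s n1 _ ind (h n1 (by simp))]
        norm_num [PySem.List.length_pyRange_one]
      simp only [pvOuterA, hin]
      rw [ih (ind + 21) (fun m hm => h m (by simp [hm]))]
      simp; ring

-- inner loop with non-matching n1
theorem pvInnerA_ne (a b n1 : Int) (h : n1 ≠ a) (ns : List Int) (ind : Int) :
    pvInnerA [a, b] n1 ns ind = (none, ind + ns.length) :=
  pvInnerA_none [a, b] n1 ns ind (fun n2 _ he => h (by injection he with h1 _; omega))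

theorem pvL21_eq : PySem.List.pyRange 0 21 1 = ([0, 1, 2, 3, 4, 5, 6, 7, 8, 9, 10, 11, 12, 13, 14, 15, 16, 17, 18, 19, 20] : List Int) := by decide

-- inner loop with matching n1 and b in range: b is found at offset b
theorem pvInnerA_hit (a b : Int) (hb0 : 0 ≤ b) (hb1 : b ≤ 20) (ind : Int) :
    pvInnerA [a, b] a (PySem.List.pyRange 0 21 1) ind = (some (ind + b), ind + b) := by
  rw [pvL21_eq]
  interval_cases b <;> norm_num [pvInnerA] <;> omega

-- outer loop with both coordinates in range finds the closed-form index
theorem pvOuterA_hit (a b : Int) (ha0 : 0 ≤ a) (ha1 : a ≤ 20) (hb0 : 0 ≤ b) (hb1 : b ≤ 20) :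
    (pvOuterA [a, b] (PySem.List.pyRange 0 21 1) 0).1 = some (a * 21 + b) := by
  have hne : ∀ n1 : Int, n1 ≠ a → ∀ ind, pvInnerA [a, b] n1 (PySem.List.pyRange 0 21 1) ind
      = (none, ind + 21) := by
    intro n1 h ind
    rw [pvInnerA_ne a b n1 h]
    norm_num [PySem.List.length_pyRange_one]
  have hhit := pvInnerA_hit a b hb0 hb1
  simp only [pvL21_eq] at hhit hne ⊢
  interval_cases a <;>
    norm_num [pvOuterA, pvL21_eq, hhit, hne]

-- ===== VERDICT (by name: the statement is the Claim_ definition above) =====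
theorem index_for_s_spec : Claim_equal_index_for_s := by
  intro s _
  unfold Spec_index_for_s index_for_s index_for_s_alt
  match s with
  | [a, b] =>
    by_cases hin : 0 ≤ a ∧ a ≤ 20 ∧ 0 ≤ b ∧ b ≤ 20
    · obtain ⟨ha0, ha1, hb0, hb1⟩ := hin
      have hterm : ¬ ([a, b] = [(-1 : Int), -1]) := by
        intro he; injection he with h1 _; omega
      have h := pvOuterA_hit a b ha0 ha1 hb0 hb1
      rcases hout : pvOuterA [a, b] (PySem.List.pyRange 0 21 1) 0 with ⟨o, i⟩
      rw [hout] at h; simp at h; subst h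
      simp [hterm, ha0, ha1, hb0, hb1]
    · have hnomatch : ∀ n1 ∈ PySem.List.pyRange 0 21 1,
          ∀ n2 ∈ PySem.List.pyRange 0 21 1, [a, b] ≠ [n1, n2] := by
        intro n1 h1 n2 h2 he
        rw [PySem.List.mem_pyRange_one] at h1 h2
        injection he with e1 e2; injection e2 with e2 _
        omega
      rw [pvOuterA_none [a, b] _ 0 hnomatch]
      norm_num [PySem.List.length_pyRange_one]
      by_cases ht : a = -1 ∧ b = -1
      · simp [ht.1, ht.2]
      · have ht' : ¬ ([a, b] = [(-1 : Int), -1]) := by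
          intro he; injection he with e1 e2; injection e2 with e2 _; exact ht ⟨e1, e2⟩
        simp [hin]
  | [] =>
    rw [pvOuterA_none [] _ 0 (by intro n1 _ n2 _ he; simp at he)]
    simp
  | [x] =>
    rw [pvOuterA_none [x] _ 0 (by intro n1 _ n2 _ he; simp at he)]
    simp
  | x :: y :: z :: rest =>
    rw [pvOuterA_none (x :: y :: z :: rest) _ 0 (by intro n1 _ n2 _ he; simp at he)]
    simp
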